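-- pv_equiv track=rewrite | github.com/Fondamenti18/fondamenti-di-programmazione | students/1795119/homework04/program01.py | prec
-- ===== SOURCE A (Python) =====
-- def prec(p, d, x, y):
--     if x not in p.keys():
--         return 0
--     val = len(d[p[x]])
--     if val == y:
--         return prec(p, d, p[x], y) + 1
--     else:
--         return prec(p, d, p[x], y)
-- ===== SOURCE B (Python) =====
-- def prec(p, d, x, y):
--     # Stage 1: materialize the chain of successor nodes starting from x.
--     chain = []
--     while x in p:
--         x = p[x]
--         chain.append(x)
--     # Stage 2: count chain nodes whose target list has length y.
--     return sum(1 for k in chain if len(d[k]) == y)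
-- ===== Notes on version B (the rewrite author's own statement) =====
-- stated objective: alternative
-- what changed: Replaces A's single recursive pass (returning prec(...)+1 along the way) with a two-stage decomposition: first materialize the chain of successor nodes as a list, then count the nodes whose target list in d has length y with a filtering sum.
import Mathlib
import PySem

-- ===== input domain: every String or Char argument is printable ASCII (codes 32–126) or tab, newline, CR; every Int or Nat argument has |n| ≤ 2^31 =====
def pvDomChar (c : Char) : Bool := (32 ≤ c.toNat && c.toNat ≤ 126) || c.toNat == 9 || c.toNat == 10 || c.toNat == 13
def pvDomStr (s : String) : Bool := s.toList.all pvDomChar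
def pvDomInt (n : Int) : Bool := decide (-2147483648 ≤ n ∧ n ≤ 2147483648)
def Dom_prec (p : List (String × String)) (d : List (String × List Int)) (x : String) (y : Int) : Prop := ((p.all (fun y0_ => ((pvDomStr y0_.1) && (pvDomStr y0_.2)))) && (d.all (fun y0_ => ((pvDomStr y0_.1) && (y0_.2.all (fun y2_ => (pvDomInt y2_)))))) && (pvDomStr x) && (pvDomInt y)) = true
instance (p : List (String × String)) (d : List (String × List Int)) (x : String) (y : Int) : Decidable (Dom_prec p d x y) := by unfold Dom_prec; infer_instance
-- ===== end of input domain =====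

-- B replaces A's single recursive counting pass with a two-stage decomposition: build the chain-node list, then count matches (same cost, different structure).


-- ===== PORT A =====
-- dict lookup (first match, per the assoc-list convention); 'none' = key not present
def pvLook (p : List (String × String)) (x : String) : Option String :=
  (p.find? (fun kv => kv.1 == x)).map Prod.snd

def pvLookD (d : List (String × List Int)) (k : String) : List Int :=
  ((d.find? (fun kv => kv.1 == k)).map Prod.snd).getD []

-- A's recursion, with fuel p.length + 1; under Pre_prec the chain ends within p.length
-- steps, so the fuel is never exhausted and this is exactly A's recursion.
def precRec (fuel : Nat) (p : List (String × String)) (d : List (String × List Int)) (x : String) (y : Int) : Int :=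
  match fuel with
  | 0 => 0
  | fuel + 1 =>
    match pvLook p x with
    | none => 0
    | some nx =>
      let val : Int := (pvLookD d nx).length
      if val = y then precRec fuel p d nx y + 1 else precRec fuel p d nx y

def prec (p : List (String × String)) (d : List (String × List Int)) (x : String) (y : Int) : Int :=
  precRec (p.length + 1) p d x y

-- ===== PORT B =====
-- Stage 1: the while-loop materializing the chain of successor nodes (same fuel bound).
def pvChain (fuel : Nat) (p : List (String × String)) (x : String) : List String :=
  match fuel with
  | 0 => []
  | fuel + 1 =>
    match pvLook p x with
    | none => []
    | some nx => nx :: pvChain fuel p nx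

-- Stage 2: the filtering sum = count of chain nodes whose target list has length y.
def prec_alt (p : List (String × String)) (d : List (String × List Int)) (x : String) (y : Int) : Int :=
  ((pvChain (p.length + 1) p x).countP (fun k => ((pvLookD d k).length : Int) == y) : Int)

-- ===== PRECONDITION & SPEC =====
-- Pre_ excludes exactly the inputs on which Python A raises: a chain from x that does not
-- leave p's keys within p.length successor steps (a cycle, on which A hits RecursionError
-- and B's loop does not terminate), or a chain successor absent from d (KeyError in both).
-- pvNext is the successor map of the input graph p (identity off p's keys).
def pvNext (p : List (String × String)) (k : String) : String :=
  (pvLook p k).getD k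

def Pre_prec (p : List (String × String)) (d : List (String × List Int)) (x : String) (y : Int) : Prop :=
  pvLook p ((pvNext p)^[p.length] x) = none ∧
  ∀ i ∈ List.range p.length,
    ((pvLook p ((pvNext p)^[i] x)).all
      (fun nx => (d.find? (fun kv => kv.1 == nx)).isSome)) = true

instance (p : List (String × String)) (d : List (String × List Int)) (x : String) (y : Int) : Decidable (Pre_prec p d x y) := by unfold Pre_prec; infer_instance

def pvWitness_prec : (List (String × String)) × (List (String × List Int)) × String × Int :=
  ([("a", "b"), ("b", "c")], [("b", [1]), ("c", [1, 2])], "a", 1)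

def Spec_prec (p : List (String × String)) (d : List (String × List Int)) (x : String) (y : Int) (out : Int) : Prop := out = prec_alt p d x y
instance (p : List (String × String)) (d : List (String × List Int)) (x : String) (y : Int) (out : Int) : Decidable (Spec_prec p d x y out) := by unfold Spec_prec; infer_instance

-- ===== CLAIM (what is proved, stated in full; the proofs are below) =====
def Claim_equal_prec : Prop := ∀ (p : List (String × String)) (d : List (String × List Int)) (x : String) (y : Int), Dom_prec p d x y → Pre_prec p d x y → Spec_prec p d x y (prec p d x y)

-- ===== LEMMAS AND PROOFS =====
theorem precRec_eq_count (p : List (String × String)) (d : List (String × List Int)) (y : Int) :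
    ∀ (fuel : Nat) (x : String),
      precRec fuel p d x y =
        ((pvChain fuel p x).countP (fun k => ((pvLookD d k).length : Int) == y) : Int) := by
  intro fuel
  induction fuel with
  | zero => intro x; simp [precRec, pvChain]
  | succ n ih =>
    intro x
    simp only [precRec, pvChain]
    cases pvLook p x with
    | none => simp
    | some nx =>
      simp only [List.countP_cons, ih]
      by_cases h : ((pvLookD d nx).length : Int) = y
      · simp [h]
      · simp [h]

-- ===== VERDICT (by name: the statement is the Claim_ definition above) =====
theorem prec_spec : Claim_equal_prec := by
  intro p d x y _ _
  show prec p d x y = prec_alt p d x y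
  simp [prec, prec_alt, precRec_eq_count]
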